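-- pv_equiv track=rewrite | github.com/Myungbin/Myungbin-bot | bot/data/post_loader.py | merge_short_messages
-- ===== SOURCE A (Python) =====
-- def merge_short_messages(conversations, min_length=5):
--     reformatted_data = []
--     conversation = []
--     current_message = ""
--
--     for i in range(len(conversations)):
--         _, _, message = conversations[i]
--
--         # 현재 메시지에 추가
--         if current_message:
--             current_message += " "
--         current_message += message
--
--         # 메시지가 최소 길이에 도달하거나 대화가 종료되면 새로운 메시지 시작
--         if (
--             len(current_message.split()) >= min_length
--             or i == len(conversations) - 1
--         ):
--             conversation.append(current_message)
--             current_message = ""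
--
--         if len(conversation) == 10:  # 10개의 메시지를 모으면 대화 추가
--             reformatted_data.append(conversation)
--             conversation = []
--
--     # 마지막 대화 추가
--     if conversation:
--         reformatted_data.append(conversation)
--
--     return reformatted_data
-- ===== SOURCE B (Python) =====
-- def merge_short_messages(conversations, min_length=5):
--     # Pass 1: merge consecutive messages into a flat list of merged strings.
--     merged = []
--     current = ""
--     last = len(conversations) - 1
--     for i, (_, _, message) in enumerate(conversations):
--         if current:
--             current += " "
--         current += message
--         if len(current.split()) >= min_length or i == last:
--             merged.append(current)
--             current = ""
--     # Pass 2: batch the flat list into conversations of 10 messages each.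
--     chunks = []
--     while merged:
--         chunks.append(merged[:10])
--         merged = merged[10:]
--     return chunks
-- ===== Notes on version B (the rewrite author's own statement) =====
-- stated objective: alternative
-- what changed: A interleaves merging and batching in one loop over three accumulators; B separates them into two passes: a first pass builds the flat list of merged messages, then a second pass slices that list into chunks of 10.
import Mathlib
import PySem

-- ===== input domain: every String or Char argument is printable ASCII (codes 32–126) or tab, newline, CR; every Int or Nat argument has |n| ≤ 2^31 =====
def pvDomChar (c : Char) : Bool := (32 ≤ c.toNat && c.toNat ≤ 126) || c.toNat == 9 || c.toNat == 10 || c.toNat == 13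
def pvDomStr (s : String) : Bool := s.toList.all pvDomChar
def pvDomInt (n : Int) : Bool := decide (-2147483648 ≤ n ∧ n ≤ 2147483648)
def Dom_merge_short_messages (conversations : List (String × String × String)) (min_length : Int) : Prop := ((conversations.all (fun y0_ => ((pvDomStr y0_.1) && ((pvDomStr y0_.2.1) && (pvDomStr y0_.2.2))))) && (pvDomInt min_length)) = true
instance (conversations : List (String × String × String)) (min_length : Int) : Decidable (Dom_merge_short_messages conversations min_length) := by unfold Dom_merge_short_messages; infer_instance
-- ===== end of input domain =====

-- B separates merging from batching: one pass builds the flat merged list, a second pass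
-- chunks it into tens; same return value as A's interleaved loop (objective: alternative).

-- ===== PORT A =====
-- loop body of A's for-loop; state = (reformatted_data, conversation, current_message)
def pvStepA (min_length n : Int) (st : List (List String) × List String × String)
    (p : Int × (String × String × String)) : List (List String) × List String × String :=
  let cur1 := (if st.2.2 ≠ "" then st.2.2 ++ " " else st.2.2) ++ p.2.2.2
  let cc : List String × String :=
    if min_length ≤ ((PySem.Str.split₀ cur1).length : Int) ∨ p.1 = n - 1
    then (st.2.1 ++ [cur1], "") else (st.2.1, cur1)
  if cc.1.length = 10 then (st.1 ++ [cc.1], ([] : List String), cc.2)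
  else (st.1, cc.1, cc.2)

def merge_short_messages (conversations : List (String × String × String)) (min_length : Int) : List (List String) :=
  let st := (PySem.List.enumerate conversations 0).foldl
      (pvStepA min_length (conversations.length : Int)) ([], [], "")
  if st.2.1 ≠ [] then st.1 ++ [st.2.1] else st.1

-- ===== PORT B =====
-- loop body of B's first pass; state = (merged, current)
def pvStepB (min_length n : Int) (st : List String × String)
    (p : Int × (String × String × String)) : List String × String :=
  let cur1 := (if st.2 ≠ "" then st.2 ++ " " else st.2) ++ p.2.2.2
  if min_length ≤ ((PySem.Str.split₀ cur1).length : Int) ∨ p.1 = n - 1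
  then (st.1 ++ [cur1], "") else (st.1, cur1)

-- B's second pass: `while merged: chunks.append(merged[:10]); merged = merged[10:]`
def pvChunks (xs : List String) : List (List String) :=
  if h : xs = [] then []
  else PySem.List.slice xs none (some 10) :: pvChunks (PySem.List.slice xs (some 10) none)
termination_by xs.length
decreasing_by
  rw [PySem.List.slice_from xs (by omega : (0:Int) ≤ (10:Int))]
  have : xs.length ≠ 0 := fun hz => h (List.eq_nil_of_length_eq_zero hz)
  simp
  omega

def merge_short_messages_alt (conversations : List (String × String × String)) (min_length : Int) : List (List String) :=
  let st := (PySem.List.enumerate conversations 0).foldl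
      (pvStepB min_length (conversations.length : Int)) ([], "")
  pvChunks st.1

-- ===== PRECONDITION & SPEC =====
def Spec_merge_short_messages (conversations : List (String × String × String)) (min_length : Int) (out : List (List String)) : Prop := out = merge_short_messages_alt conversations min_length
instance (conversations : List (String × String × String)) (min_length : Int) (out : List (List String)) : Decidable (Spec_merge_short_messages conversations min_length out) := by unfold Spec_merge_short_messages; infer_instance

-- ===== CLAIM (what is proved, stated in full; the proofs are below) =====
def Claim_equal_merge_short_messages : Prop := ∀ (conversations : List (String × String × String)) (min_length : Int), Dom_merge_short_messages conversations min_length → Spec_merge_short_messages conversations min_length (merge_short_messages conversations min_length)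

-- ===== LEMMAS AND PROOFS =====

lemma pv_loop_inv (ml n : Int) (l : List (Int × (String × String × String))) :
    ∀ (r : List (List String)) (c : List String) (cur : String),
      (∀ x ∈ r, x.length = 10) → c.length < 10 →
      (l.foldl (pvStepB ml n) (r.flatten ++ c, cur)).1
          = (l.foldl (pvStepA ml n) (r, c, cur)).1.flatten
            ++ (l.foldl (pvStepA ml n) (r, c, cur)).2.1
        ∧ (l.foldl (pvStepB ml n) (r.flatten ++ c, cur)).2
            = (l.foldl (pvStepA ml n) (r, c, cur)).2.2
        ∧ (∀ x ∈ (l.foldl (pvStepA ml n) (r, c, cur)).1, x.length = 10)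
        ∧ (l.foldl (pvStepA ml n) (r, c, cur)).2.1.length < 10 := by
  induction l with
  | nil => intro r c cur h10 hlt; exact ⟨rfl, rfl, h10, hlt⟩
  | cons p l ih =>
    intro r c cur h10 hlt
    simp only [List.foldl_cons]
    set cur1 := (if cur = "" then cur else cur ++ " ") ++ p.2.2.2 with hcur1
    by_cases hf : ml ≤ ((PySem.Str.split₀ cur1).length : Int) ∨ p.1 = n - 1
    · by_cases hten : (c ++ [cur1]).length = 10
      · have hA : pvStepA ml n (r, c, cur) p = (r ++ [c ++ [cur1]], [], "") := by
          simp only [pvStepA, ne_eq, ite_not, ← hcur1]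
          rw [if_pos hf, if_pos hten]
        have hB : pvStepB ml n (r.flatten ++ c, cur) p
            = ((r.flatten ++ c) ++ [cur1], "") := by
          simp only [pvStepB, ne_eq, ite_not, ← hcur1]
          rw [if_pos hf]
        rw [hA, hB]
        have hm : (r.flatten ++ c) ++ [cur1] = (r ++ [c ++ [cur1]]).flatten ++ [] := by simp
        rw [hm]
        refine ih _ _ _ ?_ (by simp)
        intro x hx
        rcases List.mem_append.mp hx with h | h
        · exact h10 x h
        · simp only [List.mem_singleton] at h
          rw [h]; exact hten
      · have hA : pvStepA ml n (r, c, cur) p = (r, c ++ [cur1], "") := by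
          simp only [pvStepA, ne_eq, ite_not, ← hcur1]
          rw [if_pos hf, if_neg hten]
        have hB : pvStepB ml n (r.flatten ++ c, cur) p
            = ((r.flatten ++ c) ++ [cur1], "") := by
          simp only [pvStepB, ne_eq, ite_not, ← hcur1]
          rw [if_pos hf]
        rw [hA, hB, List.append_assoc]
        refine ih _ _ _ h10 ?_
        have hlen : (c ++ [cur1]).length = c.length + 1 := by simp
        omega
    · have hA : pvStepA ml n (r, c, cur) p = (r, c, cur1) := by
        simp only [pvStepA, ne_eq, ite_not, ← hcur1]
        rw [if_neg hf]
        have : ¬ (c.length = 10) := by omega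
        rw [if_neg this]
      have hB : pvStepB ml n (r.flatten ++ c, cur) p = (r.flatten ++ c, cur1) := by
        simp only [pvStepB, ne_eq, ite_not, ← hcur1]
        rw [if_neg hf]
      rw [hA, hB]
      exact ih _ _ _ h10 hlt

lemma pv_chunks_small (c : List String) (hlt : c.length < 10) :
    pvChunks c = if c = [] then [] else [c] := by
  by_cases hc : c = []
  · rw [hc, pvChunks]; simp
  · rw [pvChunks, dif_neg hc, if_neg hc,
        PySem.List.slice_to c (by omega : (0:Int) ≤ (10:Int)),
        PySem.List.slice_from c (by omega : (0:Int) ≤ (10:Int))]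
    have h1 : c.take (10:Int).toNat = c := List.take_of_length_le (by omega)
    have h2 : c.drop (10:Int).toNat = ([] : List String) := List.drop_eq_nil_of_le (by omega)
    rw [h1, h2, pvChunks]
    simp

lemma pv_chunks_flatten :
    ∀ (r : List (List String)) (c : List String),
      (∀ x ∈ r, x.length = 10) → c.length < 10 →
      pvChunks (r.flatten ++ c) = r ++ (if c = [] then [] else [c]) := by
  intro r
  induction r with
  | nil =>
    intro c _ hlt
    simpa using pv_chunks_small c hlt
  | cons x r ih =>
    intro c h10 hlt
    have hx : x.length = 10 := h10 x (by simp)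
    have hne : x ++ (r.flatten ++ c) ≠ [] := by
      intro h
      have := congrArg List.length h
      simp [hx] at this
    rw [List.flatten_cons, List.append_assoc, pvChunks, dif_neg hne,
        PySem.List.slice_to _ (by omega : (0:Int) ≤ (10:Int)),
        PySem.List.slice_from _ (by omega : (0:Int) ≤ (10:Int))]
    have h1 : (x ++ (r.flatten ++ c)).take (10:Int).toNat = x := by
      have hh : (10:Int).toNat = x.length := by omega
      rw [hh, List.take_left]
    have h2 : (x ++ (r.flatten ++ c)).drop (10:Int).toNat = r.flatten ++ c := by
      have hh : (10:Int).toNat = x.length := by omega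
      rw [hh, List.drop_left]
    rw [h1, h2, ih c (fun y hy => h10 y (by simp [hy])) hlt]
    simp

-- ===== VERDICT (by name: the statement is the Claim_ definition above) =====
theorem merge_short_messages_spec : Claim_equal_merge_short_messages := by
  intro conversations min_length _
  unfold Spec_merge_short_messages merge_short_messages merge_short_messages_alt
  dsimp only
  obtain ⟨h1, -, h10, hlt⟩ := pv_loop_inv min_length (conversations.length : Int)
      (PySem.List.enumerate conversations 0) [] [] "" (by simp) (by simp)
  simp only [List.flatten_nil, List.nil_append] at h1
  rw [h1, pv_chunks_flatten _ _ h10 hlt]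
  by_cases hc : ((PySem.List.enumerate conversations 0).foldl
      (pvStepA min_length (conversations.length : Int)) ([], [], "")).2.1 = [] <;> simp [hc]
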